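-- pv_equiv track=rewrite | github.com/botho-project/botho | cluster-tax/scripts/gini_account_model.py | mix_tags
-- ===== SOURCE A (Python) =====
-- from typing import Dict, List, Tuple
--
-- TAG_PRUNE_THRESHOLD = 100  # 0.01%
--
-- def mix_tags(self_tags: Dict[int, int], self_value: int,
--              incoming_tags: Dict[int, int], incoming_value: int) -> Dict[int, int]:
--     """Mix incoming tags into existing tags (value-weighted average)."""
--     total_value = self_value + incoming_value
--     if total_value == 0:
--         return {}
--
--     # Collect all clusters
--     all_clusters = set(self_tags.keys()) | set(incoming_tags.keys())
--
--     result = {}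
--     for cluster in all_clusters:
--         self_weight = self_tags.get(cluster, 0)
--         incoming_weight = incoming_tags.get(cluster, 0)
--
--         # Weighted average
--         new_weight = (self_value * self_weight + incoming_value * incoming_weight) // total_value
--         if new_weight >= TAG_PRUNE_THRESHOLD:
--             result[cluster] = new_weight
--
--     return result
-- ===== SOURCE B (Python) =====
-- TAG_PRUNE_THRESHOLD = 100  # 0.01%
--
--
-- def mix_tags(self_tags, self_value, incoming_tags, incoming_value):
--     """Mix incoming tags into existing tags (value-weighted average)."""
--     total_value = self_value + incoming_value
--     if total_value == 0:
--         return {}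
--
--     # Accumulate the raw weighted numerator per cluster in one pass over
--     # each dict; floor-divide once at the end and prune.
--     numerator = {}
--     for cluster, weight in self_tags.items():
--         numerator[cluster] = numerator.get(cluster, 0) + self_value * weight
--     for cluster, weight in incoming_tags.items():
--         numerator[cluster] = numerator.get(cluster, 0) + incoming_value * weight
--
--     result = {}
--     for cluster, num in numerator.items():
--         new_weight = num // total_value
--         if new_weight >= TAG_PRUNE_THRESHOLD:
--             result[cluster] = new_weight
--     return result
-- ===== Notes on version B (the rewrite author's own statement) =====
-- stated objective: alternative
-- what changed: Replaces the set-union-of-keys loop with two direct accumulation passes that build a raw numerator dict (self pass then incoming pass via get), followed by one final pass that floor-divides the combined numerator once and prunes below the threshold.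
import Mathlib
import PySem

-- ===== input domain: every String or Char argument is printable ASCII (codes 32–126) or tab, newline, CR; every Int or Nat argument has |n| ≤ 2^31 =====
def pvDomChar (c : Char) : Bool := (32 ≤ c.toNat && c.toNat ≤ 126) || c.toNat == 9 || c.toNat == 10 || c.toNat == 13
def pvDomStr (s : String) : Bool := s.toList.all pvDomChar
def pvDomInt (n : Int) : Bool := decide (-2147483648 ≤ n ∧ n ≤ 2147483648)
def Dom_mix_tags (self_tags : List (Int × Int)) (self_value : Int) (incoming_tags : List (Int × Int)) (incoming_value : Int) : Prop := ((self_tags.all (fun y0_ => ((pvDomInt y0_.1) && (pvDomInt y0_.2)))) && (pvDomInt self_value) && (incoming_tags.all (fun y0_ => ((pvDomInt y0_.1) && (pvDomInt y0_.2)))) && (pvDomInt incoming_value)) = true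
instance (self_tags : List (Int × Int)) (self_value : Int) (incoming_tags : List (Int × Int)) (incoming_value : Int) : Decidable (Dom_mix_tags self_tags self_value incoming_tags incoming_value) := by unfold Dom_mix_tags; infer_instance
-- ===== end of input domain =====

-- B replaces A's union-of-key-sets loop by two direct accumulation passes building a raw
-- numerator dict plus one final divide-and-prune pass (objective: alternative decomposition).

def TAG_PRUNE_THRESHOLD : Int := 100

-- ===== PORT A =====
def mix_tags (self_tags : List (Int × Int)) (self_value : Int) (incoming_tags : List (Int × Int)) (incoming_value : Int) : List (Int × Int) :=
  let total_value := self_value + incoming_value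
  if total_value = 0 then []
  else
    let sd := PySem.Dict.ofList self_tags
    let idt := PySem.Dict.ofList incoming_tags
    let all_clusters := PySem.Set.union (PySem.Set.ofList sd.keys) (PySem.Set.ofList idt.keys)
    let result := all_clusters.foldl (fun r cluster =>
        let self_weight := sd.getD cluster 0
        let incoming_weight := idt.getD cluster 0
        let new_weight := PySem.Int.floordiv (self_value * self_weight + incoming_value * incoming_weight) total_value
        if TAG_PRUNE_THRESHOLD ≤ new_weight then r.insert cluster new_weight else r)
      PySem.Dict.empty
    result.items

-- ===== PORT B =====
def mix_tags_alt (self_tags : List (Int × Int)) (self_value : Int) (incoming_tags : List (Int × Int)) (incoming_value : Int) : List (Int × Int) :=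
  let total_value := self_value + incoming_value
  if total_value = 0 then []
  else
    let numerator₁ := (PySem.Dict.ofList self_tags).items.foldl
        (fun d p => d.insert p.1 (d.getD p.1 0 + self_value * p.2)) PySem.Dict.empty
    let numerator := (PySem.Dict.ofList incoming_tags).items.foldl
        (fun d p => d.insert p.1 (d.getD p.1 0 + incoming_value * p.2)) numerator₁
    let result := numerator.items.foldl (fun r p =>
        let new_weight := PySem.Int.floordiv p.2 total_value
        if TAG_PRUNE_THRESHOLD ≤ new_weight then r.insert p.1 new_weight else r)
      PySem.Dict.empty
    result.items

-- ===== PRECONDITION & SPEC =====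
def Spec_mix_tags (self_tags : List (Int × Int)) (self_value : Int) (incoming_tags : List (Int × Int)) (incoming_value : Int) (out : List (Int × Int)) : Prop := out = mix_tags_alt self_tags self_value incoming_tags incoming_value
instance (self_tags : List (Int × Int)) (self_value : Int) (incoming_tags : List (Int × Int)) (incoming_value : Int) (out : List (Int × Int)) : Decidable (Spec_mix_tags self_tags self_value incoming_tags incoming_value out) := by unfold Spec_mix_tags; infer_instance

-- ===== CLAIM (what is proved, stated in full; the proofs are below) =====
def Claim_equal_mix_tags : Prop := ∀ (self_tags : List (Int × Int)) (self_value : Int) (incoming_tags : List (Int × Int)) (incoming_value : Int), Dom_mix_tags self_tags self_value incoming_tags incoming_value → Spec_mix_tags self_tags self_value incoming_tags incoming_value (mix_tags self_tags self_value incoming_tags incoming_value)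

-- ===== LEMMAS AND PROOFS =====

/-- A conditional-insert loop over fresh, pairwise-distinct keys appends exactly the
    kept pairs, in order. -/
lemma items_foldl_insert_if {α : Type} (l : List α) (k : α → Int) (f : α → Int)
    (d : PySem.Dict Int Int) (hnd : (l.map k).Nodup)
    (hfresh : ∀ x ∈ l, d.contains (k x) = false) :
    (l.foldl (fun r x => if TAG_PRUNE_THRESHOLD ≤ f x then r.insert (k x) (f x) else r) d).items
      = d.items ++ (l.filter (fun x => TAG_PRUNE_THRESHOLD ≤ f x)).map (fun x => (k x, f x)) := by
  induction l generalizing d with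
  | nil => simp
  | cons a rest ih =>
    simp only [List.map_cons, List.nodup_cons] at hnd
    have hne : ∀ y ∈ rest, k y ≠ k a := fun y hy he => hnd.1 (he ▸ List.mem_map_of_mem hy)
    simp only [List.foldl_cons, List.filter_cons]
    by_cases hp : TAG_PRUNE_THRESHOLD ≤ f a
    · rw [if_pos hp, ih _ hnd.2 ?fresh, PySem.Dict.items_insert_of_not_contains _ _ (hfresh a (by simp))]
      · simp [hp]
      case fresh =>
        intro y hy
        rw [PySem.Dict.contains_insert]
        simp [hne y hy, hfresh y (by simp [hy])]
    · rw [if_neg hp, ih _ hnd.2 (fun y hy => hfresh y (by simp [hy]))]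
      simp [hp]

/-- The accumulate-with-get loop adds, per key `c`, the sum of the mapped matching values. -/
lemma getD_foldl_insert_get_add (l : List (Int × Int)) (g : Int → Int)
    (d : PySem.Dict Int Int) (c : Int) :
    (l.foldl (fun d p => d.insert p.1 (d.getD p.1 0 + g p.2)) d).getD c 0
      = d.getD c 0 + ((l.filter (fun p => p.1 == c)).map (fun p => g p.2)).sum := by
  induction l generalizing d with
  | nil => simp
  | cons a rest ih =>
    simp only [List.foldl_cons, ih, List.filter_cons]
    by_cases h : a.1 = c
    · subst h
      simp [PySem.Dict.getD_insert_self]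
      ring
    · rw [PySem.Dict.getD_insert (d := d)]
      simp [h, Ne.symm h]

/-- On a duplicate-free list, filtering by `== c` keeps at most the one occurrence of `c`. -/
lemma filter_beq_of_nodup (l : List Int) (h : l.Nodup) (c : Int) :
    l.filter (fun x => x == c) = if c ∈ l then [c] else [] := by
  induction l with
  | nil => simp
  | cons a rest ih =>
    simp only [List.nodup_cons] at h
    simp only [List.filter_cons, ih h.2]
    by_cases hac : a = c
    · subst hac; simp [h.1]
    · simp [hac, Ne.symm hac]

/-- With unique keys, the matching-values sum of a dict's items is a single lookup. -/
lemma sum_filter_items (d : PySem.Dict Int Int) (hnd : d.keys.Nodup) (c v : Int) :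
    ((d.items.filter (fun p => p.1 == c)).map (fun p => v * p.2)).sum = v * d.getD c 0 := by
  rw [PySem.Dict.items_eq_map_keys d hnd 0, List.filter_map]
  have : ((fun p : Int × Int => p.1 == c) ∘ fun k => (k, d.getD k 0)) = fun k => k == c := rfl
  rw [this, filter_beq_of_nodup _ hnd c]
  by_cases hc : c ∈ d.keys
  · simp [hc]
  · have : d.contains c = false := by
      rw [← Bool.not_eq_true, PySem.Dict.contains_iff_mem_keys]; exact hc
    simp [hc, PySem.Dict.getD_of_not_contains d 0 this]

-- ===== VERDICT (by name: the statement is the Claim_ definition above) =====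
theorem mix_tags_spec : Claim_equal_mix_tags := by
  intro st sv it iv _
  unfold Spec_mix_tags
  by_cases ht : sv + iv = 0
  · simp [mix_tags, mix_tags_alt, ht]
  · simp only [mix_tags, mix_tags_alt, if_neg ht]
    set sd := PySem.Dict.ofList st with hsd
    set idt := PySem.Dict.ofList it with hidt
    set U : List Int := PySem.Set.update sd.keys idt.keys with hU
    set F : Int → Int := fun c => PySem.Int.floordiv (sv * sd.getD c 0 + iv * idt.getD c 0) (sv + iv) with hF
    set num : PySem.Dict Int Int := (PySem.Dict.ofList it).items.foldl
          (fun d p => d.insert p.1 (d.getD p.1 0 + iv * p.2))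
          ((PySem.Dict.ofList st).items.foldl
            (fun d p => d.insert p.1 (d.getD p.1 0 + sv * p.2)) PySem.Dict.empty) with hnum
    have hUnodup : U.Nodup := PySem.Set.nodup_update _ _ (PySem.Dict.nodup_keys_ofList _)
    -- A's union of key sets is U
    have hunion : PySem.Set.union (PySem.Set.ofList sd.keys) (PySem.Set.ofList idt.keys) = U := by
      rw [PySem.Set.union, PySem.Set.ofList_eq_self_of_nodup _ (PySem.Dict.nodup_keys_ofList _),
          PySem.Set.ofList_eq_self_of_nodup _ (PySem.Dict.nodup_keys_ofList _)]
    -- the numerator dict: its keys are U and it holds the combined raw numerators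
    have hkeys : num.keys = U := by
      rw [hnum, PySem.Dict.keys_foldl_insert_key _ Prod.fst, PySem.Dict.keys_foldl_insert_key _ Prod.fst]
      show PySem.Set.update (PySem.Set.update PySem.Dict.empty.keys sd.keys) idt.keys = U
      rw [PySem.Dict.keys_empty, PySem.Set.update_nil_left,
          PySem.Set.ofList_eq_self_of_nodup _ (PySem.Dict.nodup_keys_ofList _)]
    have hnodup : num.keys.Nodup := hkeys ▸ hUnodup
    have hgetD : ∀ c, num.getD c 0 = sv * sd.getD c 0 + iv * idt.getD c 0 := by
      intro c
      rw [hnum, getD_foldl_insert_get_add, getD_foldl_insert_get_add,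
          sum_filter_items sd (PySem.Dict.nodup_keys_ofList _),
          sum_filter_items idt (PySem.Dict.nodup_keys_ofList _)]
      simp [PySem.Dict.getD_empty]
    have hitems : num.items = U.map (fun c => (c, sv * sd.getD c 0 + iv * idt.getD c 0)) := by
      rw [PySem.Dict.items_eq_map_keys num hnodup 0, hkeys]
      exact List.map_congr_left (fun c _ => by rw [hgetD c])
    -- both pruning folds append exactly the kept pairs
    have hA := items_foldl_insert_if U (fun c => c) F PySem.Dict.empty (by simpa using hUnodup)
        (fun x _ => PySem.Dict.contains_empty _)
    have hB := items_foldl_insert_if num.items Prod.fst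
        (fun p => PySem.Int.floordiv p.2 (sv + iv)) PySem.Dict.empty hnodup
        (fun x _ => PySem.Dict.contains_empty _)
    simp only [hunion]
    rw [hA, hB, hitems, List.filter_map, List.map_map]
    rfl
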